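-- pv_equiv track=rewrite | github.com/lofaldli/advent-of-code | 2015/day5.py | nice_two
-- ===== SOURCE A (Python) =====
-- def nice_two(s):
--     pairs = tuple(zip(s, s[2:]+s[:2]))[:-2]
--     if sum(map(lambda p: p[0]==p[1], pairs)) == 0:
--         return False
--
--     for i in range(len(s)-2):
--         if s[i:i+2] in s[i+2:]:
--             return True
--
--     return False
-- ===== SOURCE B (Python) =====
-- def nice_two(s):
--     # one pass for the pair rule (no inner substring scan): 'seen' holds every pair that ended at least
--     # two positions back, so a hit is a non-overlapping repeat
--     seen = set()
--     has_pair = False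
--     for i in range(len(s) - 1):
--         if i >= 2:
--             seen.add(s[i-2:i])
--         if s[i:i+2] in seen:
--             has_pair = True
--     has_repeat = any(s[i] == s[i+2] for i in range(len(s) - 2))
--     return has_repeat and has_pair
-- ===== Notes on version B (the rewrite author's own statement) =====
-- stated objective: alternative
-- what changed: A rescans the remaining string for each index (substring test s[i:i+2] in s[i+2:]) and pre-counts the letter-repeat rule via a zip/wraparound trick; B makes a single pass keeping a set of pairs seen at least two positions back, so the repeated-pair test needs no inner scan (asymptotically O(n) vs O(n^2), though A's C-level substring search and early exit make it as fast in practice).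
import Mathlib
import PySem

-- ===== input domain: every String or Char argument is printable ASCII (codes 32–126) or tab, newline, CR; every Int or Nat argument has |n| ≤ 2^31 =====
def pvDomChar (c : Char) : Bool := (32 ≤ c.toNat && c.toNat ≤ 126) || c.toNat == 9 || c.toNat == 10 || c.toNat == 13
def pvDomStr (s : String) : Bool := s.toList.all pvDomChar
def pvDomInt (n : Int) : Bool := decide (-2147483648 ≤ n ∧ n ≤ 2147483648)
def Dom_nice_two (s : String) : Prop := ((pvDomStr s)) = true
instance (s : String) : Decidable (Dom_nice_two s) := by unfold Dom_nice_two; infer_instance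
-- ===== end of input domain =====

-- B replaces A's per-index substring scan for the repeated pair by a single pass that keeps
-- a set of the pairs seen at least two positions back (objective: alternative algorithm).


-- ===== PORT A =====
def nice_two (s : String) : Bool :=
  let cs := s.toList
  let pairs := PySem.List.slice
      (cs.zip (PySem.Chars.slice cs (some 2) none ++ PySem.Chars.slice cs none (some 2)))
      none (some (-2))
  if (pairs.map (fun p => if p.1 == p.2 then (1 : Int) else 0)).sum == 0 then
    false
  else
    (PySem.List.pyRange 0 ((cs.length : Int) - 2) 1).any (fun i =>
      PySem.Chars.isIn (PySem.Chars.slice cs (some i) (some (i + 2)))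
        (PySem.Chars.slice cs (some (i + 2)) none))

-- ===== PORT B =====
def nice_two_alt (s : String) : Bool :=
  let cs := s.toList
  let res := (PySem.List.pyRange 0 ((cs.length : Int) - 1) 1).foldl
    (fun (acc : PySem.Set (List Char) × Bool) i =>
      let seen := if 2 ≤ i then
          PySem.Set.add acc.1 (PySem.Chars.slice cs (some (i - 2)) (some i))
        else acc.1
      let hp := if PySem.Set.contains seen (PySem.Chars.slice cs (some i) (some (i + 2))) then
          true
        else acc.2
      (seen, hp))
    (PySem.Set.empty, false)
  let has_repeat := (PySem.List.pyRange 0 ((cs.length : Int) - 2) 1).any (fun i =>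
    PySem.List.pyGet? cs i == PySem.List.pyGet? cs (i + 2))
  has_repeat && res.2

-- ===== PRECONDITION & SPEC =====
def Spec_nice_two (s : String) (out : Bool) : Prop := out = nice_two_alt s
instance (s : String) (out : Bool) : Decidable (Spec_nice_two s out) := by unfold Spec_nice_two; infer_instance

-- ===== CLAIM (what is proved, stated in full; the proofs are below) =====
def Claim_equal_nice_two : Prop := ∀ (s : String), Dom_nice_two s → Spec_nice_two s (nice_two s)

-- ===== LEMMAS AND PROOFS =====

def pairAt (cs : List Char) (i : Nat) : List Char := (cs.drop i).take 2
def hasPair (cs : List Char) : Prop :=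
  ∃ i j : Nat, i + 2 ≤ j ∧ j + 2 ≤ cs.length ∧ pairAt cs i = pairAt cs j
def hasRepeat (cs : List Char) : Prop :=
  ∃ i : Nat, i + 2 < cs.length ∧ cs[i]? = cs[i + 2]?

theorem length_pairAt (cs : List Char) (i : Nat) :
    (pairAt cs i).length = min 2 (cs.length - i) := by
  simp [pairAt]

theorem pairAt_prefix_iff (cs : List Char) (i m : Nat) (h : (pairAt cs i).length = 2) :
    pairAt cs i <+: cs.drop m ↔ pairAt cs i = pairAt cs m := by
  rw [List.prefix_iff_eq_take, h]; rfl

theorem isIn_window_iff (cs : List Char) (k : Nat) (hk : k + 2 ≤ cs.length) :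
    PySem.Chars.isIn (pairAt cs k) (cs.drop (k + 2)) = true ↔
      ∃ j : Nat, k + 2 ≤ j ∧ j + 2 ≤ cs.length ∧ pairAt cs k = pairAt cs j := by
  have hlen : (pairAt cs k).length = 2 := by rw [length_pairAt]; omega
  rw [← PySem.Chars.exists_prefix_drop_iff_isIn]
  constructor
  · rintro ⟨j, hj⟩
    rw [List.drop_drop] at hj
    rw [pairAt_prefix_iff cs k (k + 2 + j) hlen] at hj
    refine ⟨k + 2 + j, by omega, ?_, hj⟩
    have h2 : (pairAt cs (k + 2 + j)).length = 2 := by rw [← hj]; exact hlen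
    rw [length_pairAt] at h2; omega
  · rintro ⟨j, h1, h2, h3⟩
    refine ⟨j - (k + 2), ?_⟩
    rw [List.drop_drop]
    have : k + 2 + (j - (k + 2)) = j := by omega
    rw [this, pairAt_prefix_iff cs k j hlen]
    exact h3

theorem zip_len (cs : List Char) : (cs.zip (cs.drop 2 ++ cs.take 2)).length = cs.length := by
  simp; omega

theorem pairs_spec (cs : List Char) (p : Char × Char) :
    p ∈ (cs.zip (cs.drop 2 ++ cs.take 2)).take (cs.length - 2) ↔
      ∃ k : Nat, k + 2 < cs.length ∧ cs[k]? = some p.1 ∧ cs[k + 2]? = some p.2 := by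
  rw [List.mem_iff_getElem]
  constructor
  · rintro ⟨k, hk, hp⟩
    have hk2 : k + 2 < cs.length := by
      rw [List.length_take, zip_len] at hk
      omega
    refine ⟨k, hk2, ?_, ?_⟩
    · rw [List.getElem_take, List.getElem_zip] at hp
      rw [List.getElem?_eq_getElem (by omega)]
      simp [← congrArg Prod.fst hp]
    · rw [List.getElem_take, List.getElem_zip] at hp
      have hlt : k < (cs.drop 2).length := by simp; omega
      rw [List.getElem_append_left hlt] at hp
      have hsnd : (cs.drop 2)[k] = p.2 := congrArg Prod.snd hp
      rw [List.getElem?_eq_getElem (by omega)]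
      refine congrArg some ?_
      rw [← hsnd, List.getElem_drop]
      congr 1
      omega
  · rintro ⟨k, hk2, h1, h2⟩
    have hlen : ((cs.zip (cs.drop 2 ++ cs.take 2)).take (cs.length - 2)).length = cs.length - 2 := by
      rw [List.length_take, zip_len]; omega
    refine ⟨k, by omega, ?_⟩
    rw [List.getElem_take, List.getElem_zip]
    have hlt : k < (cs.drop 2).length := by simp; omega
    rw [List.getElem_append_left hlt]
    rw [List.getElem?_eq_getElem (by omega)] at h1
    rw [List.getElem?_eq_getElem (by omega)] at h2
    refine Prod.ext ?_ ?_
    · exact Option.some.inj h1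
    · show (cs.drop 2)[k] = p.2
      rw [List.getElem_drop, ← Option.some.inj h2]
      congr 1
      omega

theorem repeat_iff_pairs (cs : List Char) :
    hasRepeat cs ↔ ∃ p ∈ (cs.zip (cs.drop 2 ++ cs.take 2)).take (cs.length - 2), p.1 == p.2 := by
  constructor
  · rintro ⟨i, hi, he⟩
    rw [List.getElem?_eq_getElem (by omega), List.getElem?_eq_getElem (by omega)] at he
    refine ⟨(cs[i], cs[i + 2]), ?_, ?_⟩
    · rw [pairs_spec]
      exact ⟨i, hi, by simp, by simp⟩
    · simpa using Option.some.inj he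
  · rintro ⟨p, hp, he⟩
    rw [pairs_spec] at hp
    obtain ⟨k, hk, h1, h2⟩ := hp
    refine ⟨k, hk, ?_⟩
    rw [h1, h2]
    simpa using beq_iff_eq.mp he

theorem any_loop_iff (cs : List Char) :
    ((PySem.List.pyRange 0 ((cs.length : Int) - 2) 1).any (fun i =>
      PySem.Chars.isIn (PySem.List.slice cs (some i) (some (i + 2)))
        (PySem.List.slice cs (some (i + 2)) none)) = true) ↔ hasPair cs := by
  rw [List.any_eq_true]
  constructor
  · rintro ⟨i, hi, hpred⟩
    rw [PySem.List.mem_pyRange_one] at hi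
    set k := i.toNat with hkdef
    have hik : i = (k : Int) := by omega
    have hk2 : k + 2 ≤ cs.length := by omega
    rw [hik] at hpred
    have e1 : PySem.List.slice cs (some (k : Int)) (some ((k : Int) + 2)) = pairAt cs k := by
      have := PySem.List.slice_natCast_add cs k 2
      push_cast at this ⊢
      exact this
    have e2 : PySem.List.slice cs (some ((k : Int) + 2)) none = cs.drop (k + 2) := by
      rw [PySem.List.slice_from _ (by omega), show ((k : Int) + 2).toNat = k + 2 by omega]
    rw [e1, e2] at hpred
    obtain ⟨j, hj1, hj2, hj3⟩ := (isIn_window_iff cs k hk2).mp hpred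
    exact ⟨k, j, hj1, hj2, hj3⟩
  · rintro ⟨a, b, hab, hb, he⟩
    refine ⟨(a : Int), ?_, ?_⟩
    · rw [PySem.List.mem_pyRange_one]
      constructor
      · omega
      · omega
    · have e1 : PySem.List.slice cs (some (a : Int)) (some ((a : Int) + 2)) = pairAt cs a := by
        have := PySem.List.slice_natCast_add cs a 2
        push_cast at this ⊢
        exact this
      have e2 : PySem.List.slice cs (some ((a : Int) + 2)) none = cs.drop (a + 2) := by
        rw [PySem.List.slice_from _ (by omega), show ((a : Int) + 2).toNat = a + 2 by omega]
      rw [e1, e2]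
      exact (isIn_window_iff cs a (by omega)).mpr ⟨b, hab, hb, he⟩

theorem nice_two_iff (s : String) :
    nice_two s = true ↔ (hasRepeat s.toList ∧ hasPair s.toList) := by
  unfold nice_two
  simp only [PySem.Chars.slice_eq_listSlice]
  rw [PySem.List.slice_to_neg_ofNat _ 2 (by omega),
      PySem.List.slice_from _ (by norm_num), PySem.List.slice_to _ (by norm_num)]
  have htn : ((2 : Int)).toNat = 2 := rfl
  rw [htn, zip_len]
  have hsum : ((((s.toList.zip (s.toList.drop 2 ++ s.toList.take 2)).take (s.toList.length - 2)).map
      (fun p => if p.1 == p.2 then (1 : Int) else 0)).sum == 0) = true ↔ ¬ hasRepeat s.toList := by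
    rw [PySem.List.sum_map_ite_one_zero, beq_iff_eq, Nat.cast_eq_zero, List.countP_eq_zero,
      repeat_iff_pairs]
    constructor
    · rintro h ⟨p, hp, he⟩
      exact absurd he (h p hp)
    · intro h p hp he
      exact h ⟨p, hp, he⟩
  split_ifs with h
  · rw [hsum] at h
    simp only [false_iff]
    tauto
  · rw [hsum] at h
    rw [any_loop_iff]
    tauto

theorem pairAt_slice (cs : List Char) (k : Nat) :
    PySem.Chars.slice cs (some (k : Int)) (some ((k : Int) + 2)) = pairAt cs k := by
  simp only [PySem.Chars.slice_eq_listSlice]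
  have := PySem.List.slice_natCast_add cs k 2
  push_cast at this ⊢
  exact this

theorem pairAt_slice_back (cs : List Char) (k : Nat) (h : 2 ≤ k) :
    PySem.Chars.slice cs (some ((k : Int) - 2)) (some (k : Int)) = pairAt cs (k - 2) := by
  simp only [PySem.Chars.slice_eq_listSlice]
  rw [show ((k : Int) - 2) = ((k - 2 : Nat) : Int) by omega, PySem.List.slice_natCast]
  unfold pairAt
  congr 1
  omega

theorem fold_inv (cs : List Char) (k : Nat) :
    (∀ p, (p ∈ ((PySem.List.pyRange 0 (k : Int) 1).foldl
      (fun (acc : PySem.Set (List Char) × Bool) i =>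
        let seen := if 2 ≤ i then
            PySem.Set.add acc.1 (PySem.Chars.slice cs (some (i - 2)) (some i))
          else acc.1
        let hp := if PySem.Set.contains seen (PySem.Chars.slice cs (some i) (some (i + 2))) then
            true
          else acc.2
        (seen, hp))
      (PySem.Set.empty, false)).1 ↔ ∃ j : Nat, j + 3 ≤ k ∧ p = pairAt cs j)) ∧
    (((PySem.List.pyRange 0 (k : Int) 1).foldl
      (fun (acc : PySem.Set (List Char) × Bool) i =>
        let seen := if 2 ≤ i then
            PySem.Set.add acc.1 (PySem.Chars.slice cs (some (i - 2)) (some i))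
          else acc.1
        let hp := if PySem.Set.contains seen (PySem.Chars.slice cs (some i) (some (i + 2))) then
            true
          else acc.2
        (seen, hp))
      (PySem.Set.empty, false)).2 = true ↔
        ∃ i j : Nat, j + 2 ≤ i ∧ i < k ∧ pairAt cs j = pairAt cs i) := by
  induction k with
  | zero =>
    rw [show ((0 : Nat) : Int) = 0 by rfl, PySem.List.pyRange_one_eq_nil (by omega)]
    constructor
    · intro p
      constructor
      · intro h
        exact absurd h List.not_mem_nil
      · rintro ⟨j, hj, -⟩
        omega
    · constructor
      · intro h
        simp at h
      · rintro ⟨i, j, -, hi, -⟩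
        omega
  | succ m ih =>
    obtain ⟨ihset, ihflag⟩ := ih
    rw [show ((m + 1 : Nat) : Int) = (m : Int) + 1 by push_cast; ring,
      PySem.List.pyRange_one_succ_right (a := 0) (b := (m : Int)) (by omega), List.foldl_append,
      List.foldl_cons, List.foldl_nil]
    rcases hR : (PySem.List.pyRange 0 ((m : Nat) : Int) 1).foldl
      (fun (acc : PySem.Set (List Char) × Bool) i =>
        let seen := if 2 ≤ i then
            PySem.Set.add acc.1 (PySem.Chars.slice cs (some (i - 2)) (some i))
          else acc.1
        let hp := if PySem.Set.contains seen (PySem.Chars.slice cs (some i) (some (i + 2))) then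
            true
          else acc.2
        (seen, hp))
      (PySem.Set.empty, false) with ⟨s0, b0⟩
    rw [hR] at ihset ihflag
    dsimp only at ihset ihflag ⊢
    have hmem : ∀ q, (q ∈ (if (2 : Int) ≤ (m : Int) then
        PySem.Set.add s0 (PySem.Chars.slice cs (some ((m : Int) - 2)) (some (m : Int)))
        else s0)) ↔ ∃ j : Nat, j + 3 ≤ m + 1 ∧ q = pairAt cs j := by
      intro q
      by_cases hm : (2 : Int) ≤ (m : Int)
      · rw [if_pos hm, pairAt_slice_back cs m (by exact_mod_cast hm)]
        rw [PySem.Set.mem_add]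
        constructor
        · rintro (hq | he)
          · obtain ⟨j, hj, he⟩ := (ihset q).mp hq
            exact ⟨j, by omega, he⟩
          · have hm' : 2 ≤ m := by exact_mod_cast hm
            exact ⟨m - 2, by omega, he⟩
        · rintro ⟨j, hj, he⟩
          by_cases hjm : j + 3 ≤ m
          · exact Or.inl ((ihset q).mpr ⟨j, hjm, he⟩)
          · have hm' : 2 ≤ m := by exact_mod_cast hm
            have hje : j = m - 2 := by omega
            exact Or.inr (hje ▸ he)
      · rw [if_neg hm]
        rw [ihset q]
        have hm2 : m < 2 := by exact_mod_cast not_le.mp hm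
        constructor
        · rintro ⟨j, hj, he⟩
          exact ⟨j, by omega, he⟩
        · rintro ⟨j, hj, he⟩
          exact ⟨j, by omega, he⟩
    refine ⟨hmem, ?_⟩
    rw [pairAt_slice]
    by_cases hc : PySem.Set.contains (if (2 : Int) ≤ (m : Int) then
        PySem.Set.add s0 (PySem.Chars.slice cs (some ((m : Int) - 2)) (some (m : Int)))
        else s0) (pairAt cs m) = true
    · rw [if_pos hc]
      simp only [true_iff]
      obtain ⟨j, hj, he⟩ := (hmem _).mp (List.mem_of_elem_eq_true hc)
      exact ⟨m, j, by omega, by omega, he.symm⟩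
    · rw [if_neg hc]
      constructor
      · intro hb
        obtain ⟨i, j, h1, h2, he⟩ := ihflag.mp hb
        exact ⟨i, j, h1, by omega, he⟩
      · rintro ⟨i, j, h1, h2, he⟩
        by_cases him : i < m
        · exact ihflag.mpr ⟨i, j, h1, him, he⟩
        · have hie : i = m := by omega
          subst hie
          exact absurd (List.elem_eq_true_of_mem ((hmem _).mpr ⟨j, by omega, he.symm⟩)) hc

theorem any_repeat_iff (cs : List Char) :
    ((PySem.List.pyRange 0 ((cs.length : Int) - 2) 1).any (fun i =>
      PySem.List.pyGet? cs i == PySem.List.pyGet? cs (i + 2)) = true) ↔ hasRepeat cs := by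
  rw [List.any_eq_true]
  constructor
  · rintro ⟨i, hi, hpred⟩
    rw [PySem.List.mem_pyRange_one] at hi
    set k := i.toNat with hkdef
    have hik : i = (k : Int) := by omega
    rw [hik, show (k : Int) + 2 = ((k + 2 : Nat) : Int) by push_cast; ring,
      PySem.List.pyGet?_natCast, PySem.List.pyGet?_natCast, beq_iff_eq] at hpred
    exact ⟨k, by omega, hpred⟩
  · rintro ⟨k, hk, he⟩
    refine ⟨(k : Int), ?_, ?_⟩
    · rw [PySem.List.mem_pyRange_one]
      omega
    · rw [show (k : Int) + 2 = ((k + 2 : Nat) : Int) by push_cast; ring,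
        PySem.List.pyGet?_natCast, PySem.List.pyGet?_natCast, beq_iff_eq]
      exact he

theorem nice_two_alt_iff (s : String) :
    nice_two_alt s = true ↔ (hasRepeat s.toList ∧ hasPair s.toList) := by
  unfold nice_two_alt
  rw [Bool.and_eq_true, any_repeat_iff]
  rcases hn : s.toList.length with _ | m
  · rw [show ((0 : Nat) : Int) - 1 = -1 by norm_num, PySem.List.pyRange_one_eq_nil (by omega)]
    simp only [List.foldl_nil]
    constructor
    · rintro ⟨-, hb⟩
      exact absurd hb (by decide)
    · rintro ⟨⟨i, hi, -⟩, -⟩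
      omega
  · rw [show ((m + 1 : Nat) : Int) - 1 = ((m : Nat) : Int) by push_cast; ring,
      ((fold_inv s.toList m).2)]
    constructor
    · rintro ⟨hr, i, j, h1, h2, he⟩
      exact ⟨hr, j, i, h1, by omega, he⟩
    · rintro ⟨hr, a, b, hab, hb, he⟩
      rw [hn] at hb
      exact ⟨hr, b, a, hab, by omega, he⟩


-- ===== VERDICT (by name: the statement is the Claim_ definition above) =====
theorem nice_two_spec : Claim_equal_nice_two := by
  intro s _
  unfold Spec_nice_two
  rw [Bool.eq_iff_iff, nice_two_iff, nice_two_alt_iff]
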